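-- pv_equiv track=rewrite | github.com/Thomaz-Castro/Conversor_Online | defs_copy.py | Conditions_C
-- ===== SOURCE A (Python) =====
-- def Conditions_C(string):
--     if (("(" in string) and (")" in string)):
--         pilha = []
--         conteudo = []
--         for i, char in enumerate(string):
--             if char == '(':
--                 pilha.append(i)
--             elif char == ')':
--                 if pilha:
--                     inicio = pilha.pop()
--                     if not pilha:
--                         conteudo.append(string[inicio+1:i])
--                 else:
--                     raise ValueError("Erro de correspondência de parênteses.")
--
--         conteudo_parenteses = ", ".join(conteudo)
--         conteudo_parenteses = "(" + conteudo_parenteses + ")"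
--         conteudo_parenteses = conteudo_parenteses.lower()
--         conteudo_parenteses = conteudo_parenteses.replace(" && ", " e ")
--         conteudo_parenteses = conteudo_parenteses.replace(" || ", " ou ")
--         conteudo_parenteses = conteudo_parenteses.replace(" == ", " = ")
--     else:
--         conteudo_parenteses = "ERRO - parênteses não encontrados"
--
--     return conteudo_parenteses
-- ===== SOURCE B (Python) =====
-- def Conditions_C(string):
--     if "(" in string and ")" in string:
--         # staged: prefix-depth array, then select top-level open/close positions, then pair them
--         depths = []
--         d = 0
--         for ch in string:
--             d += (ch == '(') - (ch == ')')
--             depths.append(d)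
--         if min(depths) < 0:
--             raise ValueError("Erro de correspondência de parênteses.")
--         starts = [i for (i, ch), dep in zip(enumerate(string), depths) if ch == '(' and dep == 1]
--         ends = [i for (i, ch), dep in zip(enumerate(string), depths) if ch == ')' and dep == 0]
--         conteudo = [string[s + 1:e] for s, e in zip(starts, ends)]
--         resultado = "(" + ", ".join(conteudo) + ")"
--         resultado = resultado.lower()
--         resultado = resultado.replace(" && ", " e ")
--         resultado = resultado.replace(" || ", " ou ")
--         resultado = resultado.replace(" == ", " = ")
--         return resultado
--     return "ERRO - parênteses não encontrados"
-- ===== Notes on version B (the rewrite author's own statement) =====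
-- stated objective: alternative
-- what changed: Replaces A's single-pass stack machine with a staged computation: build the prefix-depth array first, then select the top-level opening positions (depth 1 after an opener) and closing positions (depth 0 after a closer) by two filters, and pair them with zip to slice out the contents; same join/lower/replace post-processing.
import Mathlib
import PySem

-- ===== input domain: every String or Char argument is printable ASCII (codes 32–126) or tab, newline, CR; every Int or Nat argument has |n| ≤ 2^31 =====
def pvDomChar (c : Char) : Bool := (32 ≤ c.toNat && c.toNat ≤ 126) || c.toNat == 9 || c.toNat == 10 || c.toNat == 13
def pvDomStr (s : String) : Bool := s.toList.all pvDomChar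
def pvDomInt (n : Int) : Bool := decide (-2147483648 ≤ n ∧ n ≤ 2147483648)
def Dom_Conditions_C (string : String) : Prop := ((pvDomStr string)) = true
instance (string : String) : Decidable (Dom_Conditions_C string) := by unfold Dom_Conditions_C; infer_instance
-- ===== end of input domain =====

-- B replaces A's single-pass stack machine by a staged computation (prefix-depth
-- array, two positional filters, zip pairing); alternative structure, same cost.

-- ===== PORT A =====
-- A's for-loop over enumerate(string): state = (pilha, conteudo); `none` = the
-- ValueError raised on a ')' with an empty stack (excluded by Pre_).
def pvALoop (l : List Char) : List (Int × Char) → List Int → List (List Char) →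
    Option (List (List Char))
  | [], _, conteudo => some conteudo
  | (i, c) :: rest, pilha, conteudo =>
    if c = '(' then
      pvALoop l rest (pilha ++ [i]) conteudo
    else if c = ')' then
      if pilha = [] then
        none  -- raise ValueError
      else
        match PySem.List.pop? pilha with
        | some (inicio, pilha') =>
          if pilha' = [] then
            pvALoop l rest pilha' (conteudo ++ [PySem.List.slice l (some (inicio + 1)) (some i)])
          else
            pvALoop l rest pilha' conteudo
        | none => none  -- unreachable: pilha ≠ []
    else
      pvALoop l rest pilha conteudo

def Conditions_C (string : String) : String :=
  let l := string.toList
  if PySem.Chars.isIn ['('] l && PySem.Chars.isIn [')'] l then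
    match pvALoop l (PySem.List.enumerate l) [] [] with
    | some conteudo =>
      let cp := ('(' :: PySem.Chars.join (", ".toList) conteudo) ++ [')']
      let cp := PySem.Chars.lower cp
      let cp := PySem.Chars.replace cp " && ".toList " e ".toList
      let cp := PySem.Chars.replace cp " || ".toList " ou ".toList
      let cp := PySem.Chars.replace cp " == ".toList " = ".toList
      String.ofList cp
    | none => ""  -- Python raises ValueError here; excluded by Pre_
  else
    "ERRO - parênteses não encontrados"

-- ===== PORT B =====
-- B's running-depth array (d += (ch=='(') - (ch==')'); depths.append(d)).
def pvDepths : List Char → Int → List Int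
  | [], _ => []
  | c :: rest, d =>
    ((d + (if c = '(' then (1 : Int) else 0) - (if c = ')' then (1 : Int) else 0))) ::
      pvDepths rest ((d + (if c = '(' then (1 : Int) else 0) - (if c = ')' then (1 : Int) else 0)))

-- B's two comprehensions over zip(enumerate(string), depths).
def pvStarts (ps : List ((Int × Char) × Int)) : List Int :=
  ps.filterMap (fun p => if p.1.2 = '(' ∧ p.2 = 1 then some p.1.1 else none)

def pvEnds (ps : List ((Int × Char) × Int)) : List Int :=
  ps.filterMap (fun p => if p.1.2 = ')' ∧ p.2 = 0 then some p.1.1 else none)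

def Conditions_C_alt (string : String) : String :=
  let l := string.toList
  if PySem.Chars.isIn ['('] l && PySem.Chars.isIn [')'] l then
    let depths := pvDepths l 0
    match PySem.List.min? depths (fun x => x) with
    | none => ""  -- min() of an empty list: unreachable, the guard forces l ≠ []
    | some m =>
      if m < 0 then ""  -- Python raises ValueError here; excluded by Pre_
      else
        let starts := pvStarts ((PySem.List.enumerate l).zip depths)
        let ends := pvEnds ((PySem.List.enumerate l).zip depths)
        let conteudo := (starts.zip ends).map
          (fun q => PySem.List.slice l (some (q.1 + 1)) (some q.2))
        let r := ('(' :: PySem.Chars.join (", ".toList) conteudo) ++ [')']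
        let r := PySem.Chars.lower r
        let r := PySem.Chars.replace r " && ".toList " e ".toList
        let r := PySem.Chars.replace r " || ".toList " ou ".toList
        let r := PySem.Chars.replace r " == ".toList " = ".toList
        String.ofList r
  else
    "ERRO - parênteses não encontrados"

-- ===== PRECONDITION & SPEC =====
-- Pre_ excludes exactly the inputs on which A raises ValueError: strings containing
-- both parenthesis characters in which some prefix has more closers than openers
-- (B raises there too).
def Pre_Conditions_C (string : String) : Prop :=
  ('(' ∈ string.toList ∧ ')' ∈ string.toList) →
    ∀ i ∈ List.range (string.toList.length + 1),
      (string.toList.take i).count ')' ≤ (string.toList.take i).count '('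
instance (string : String) : Decidable (Pre_Conditions_C string) := by
  unfold Pre_Conditions_C; infer_instance

def pvWitness_Conditions_C : String := "(A == b) && (c)"

def Spec_Conditions_C (string : String) (out : String) : Prop := out = Conditions_C_alt string
instance (string : String) (out : String) : Decidable (Spec_Conditions_C string out) := by unfold Spec_Conditions_C; infer_instance

-- ===== CLAIM (what is proved, stated in full; the proofs are below) =====
def Claim_equal_Conditions_C : Prop := ∀ (string : String), Dom_Conditions_C string → Pre_Conditions_C string → Spec_Conditions_C string (Conditions_C string)

-- ===== LEMMAS AND PROOFS =====

-- Proof-only intermediate: a depth-counter version of A's loop; A's stack has this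
-- depth as its length and `start` at its bottom.
def pvBLoop (l : List Char) : List (Int × Char) → Int → Int → List (List Char) →
    Option (List (List Char))
  | [], _, _, conteudo => some conteudo
  | (i, c) :: rest, depth, start, conteudo =>
    if c = '(' then
      pvBLoop l rest (depth + 1) (if depth = 0 then i else start) conteudo
    else if c = ')' then
      if depth = 0 then
        none
      else if depth - 1 = 0 then
        pvBLoop l rest (depth - 1) start (conteudo ++ [PySem.List.slice l (some (start + 1)) (some i)])
      else
        pvBLoop l rest (depth - 1) start conteudo
    else
      pvBLoop l rest depth start conteudo

lemma pvLoop_eq (l : List Char) (enum : List (Int × Char)) :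
    ∀ (pilha : List Int) (start : Int) (conteudo : List (List Char)),
    (pilha ≠ [] → pilha.head? = some start) →
    pvALoop l enum pilha conteudo =
      pvBLoop l enum (pilha.length : Int) start conteudo := by
  induction enum with
  | nil => intro pilha start conteudo _; rfl
  | cons p rest ih =>
    obtain ⟨i, c⟩ := p
    intro pilha start conteudo hhead
    by_cases hc : c = '('
    · subst hc
      simp only [pvALoop, pvBLoop, Char.reduceEq, reduceIte]
      have hlen : (((pilha ++ [i]).length : Nat) : Int) = (pilha.length : Int) + 1 := by
        simp
      by_cases h0 : (pilha.length : Int) = 0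
      · have hp : pilha = [] := by
          cases pilha with
          | nil => rfl
          | cons a as => exfalso; simp at h0; omega
        subst hp
        rw [if_pos h0, h0]
        have := ih [i] i conteudo (by intro _; rfl)
        simpa using this
      · rw [if_neg h0]
        have hne : pilha ≠ [] := by intro h; subst h; simp at h0
        have hh : (pilha ++ [i]).head? = some start := by
          cases pilha with
          | nil => exact absurd rfl hne
          | cons a as => simpa using hhead hne
        have := ih (pilha ++ [i]) start conteudo (fun _ => hh)
        rw [this, hlen]
    · by_cases hcr : c = ')'
      · subst hcr
        simp only [pvALoop, pvBLoop, Char.reduceEq, reduceIte]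
        rcases List.eq_nil_or_concat pilha with hnil | ⟨ys, x, hys⟩
        · subst hnil; simp
        · rw [List.concat_eq_append] at hys
          subst hys
          have hne : ys ++ [x] ≠ [] := by simp
          have h0 : ¬ ((((ys ++ [x]).length : Nat) : Int) = 0) := by
            push_cast [List.length_append, List.length_cons, List.length_nil]
            omega
          rw [if_neg hne, if_neg h0, PySem.List.pop?_last]
          dsimp only
          rcases List.eq_nil_or_concat ys with hy | ⟨zs, z, hzs⟩
          · subst hy
            have hx : start = x := (show x = start by simpa using hhead hne).symm
            subst hx
            have := ih [] start
              (conteudo ++ [PySem.List.slice l (some (start + 1)) (some i)])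
              (by intro h; exact absurd rfl h)
            simpa using this
          · rw [List.concat_eq_append] at hzs
            have hyne : ys ≠ [] := by subst hzs; simp
            have hylen : ¬ (((ys.length : Nat) : Int) = 0) := by
              subst hzs
              push_cast [List.length_append, List.length_cons, List.length_nil]
              omega
            have hd1 : (((ys ++ [x]).length : Nat) : Int) - 1 = (ys.length : Int) := by
              push_cast [List.length_append, List.length_cons, List.length_nil]
              omega
            rw [if_neg hyne, hd1, if_neg hylen]
            have hh : ys.head? = some start := by
              cases ys with
              | nil => exact absurd rfl hyne
              | cons a as => simpa using hhead hne
            exact ih ys start conteudo (fun _ => hh)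
      · simp only [pvALoop, pvBLoop, if_neg hc, if_neg hcr]
        exact ih pilha start conteudo hhead

-- The counter loop equals B's staged computation (filters + zip), under
-- nonnegative running depths; pvGroups is the staged result for a suffix.
def pvGroups (l : List Char) (rest : List (Int × Char)) (d start : Int) : List (List Char) :=
  if d = 0 then
    ((pvStarts (rest.zip (pvDepths (rest.map Prod.snd) d))).zip
      (pvEnds (rest.zip (pvDepths (rest.map Prod.snd) d)))).map
      (fun q => PySem.List.slice l (some (q.1 + 1)) (some q.2))
  else
    match pvEnds (rest.zip (pvDepths (rest.map Prod.snd) d)) with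
    | [] => []
    | e :: E' =>
      PySem.List.slice l (some (start + 1)) (some e) ::
        ((pvStarts (rest.zip (pvDepths (rest.map Prod.snd) d))).zip E').map
          (fun q => PySem.List.slice l (some (q.1 + 1)) (some q.2))


lemma pvBLoop_staged (l : List Char) :
    ∀ (rest : List (Int × Char)) (d start : Int) (conteudo : List (List Char)),
    0 ≤ d →
    (∀ x ∈ pvDepths (rest.map Prod.snd) d, 0 ≤ x) →
    pvBLoop l rest d start conteudo = some (conteudo ++ pvGroups l rest d start) := by
  intro rest
  induction rest with
  | nil =>
    intro d start conteudo _ _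
    unfold pvGroups pvStarts pvEnds pvDepths
    split_ifs <;> simp [pvBLoop]
  | cons p rest ih =>
    obtain ⟨i, c⟩ := p
    intro d start conteudo hd hnn
    have hdep : pvDepths (((i, c) :: rest).map Prod.snd) d =
        ((d + (if c = '(' then (1 : Int) else 0) - (if c = ')' then (1 : Int) else 0))) ::
          pvDepths (rest.map Prod.snd)
            ((d + (if c = '(' then (1 : Int) else 0) - (if c = ')' then (1 : Int) else 0))) := rfl
    by_cases hc : c = '('
    · subst hc
      have hdv : (d + (if '(' = '(' then (1 : Int) else 0) - (if '(' = ')' then (1 : Int) else 0)) = d + 1 := by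
        simp
      rw [hdv] at hdep
      have hnn' : ∀ x ∈ pvDepths (rest.map Prod.snd) (d + 1), 0 ≤ x := by
        intro x hx
        exact hnn x (by rw [hdep]; exact List.mem_cons_of_mem _ hx)
      by_cases hd0 : d = 0
      · subst hd0
        have hdep2 : pvDepths (((i, '(') :: rest).map Prod.snd) 0
            = 1 :: pvDepths (rest.map Prod.snd) 1 := by
          simp [pvDepths]
        have hnn1 : ∀ x ∈ pvDepths (rest.map Prod.snd) 1, 0 ≤ x := by
          intro x hx
          exact hnn x (by rw [hdep2]; exact List.mem_cons_of_mem _ hx)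
        rw [show pvBLoop l ((i, '(') :: rest) 0 start conteudo
              = pvBLoop l rest 1 i conteudo from by simp [pvBLoop]]
        rw [ih 1 i conteudo (by omega) hnn1]
        congr 1
        unfold pvGroups
        rw [if_pos rfl, if_neg (by omega), hdep2, List.zip_cons_cons]
        rw [show pvStarts (((i, '('), (1:Int)) :: rest.zip (pvDepths (rest.map Prod.snd) 1))
              = i :: pvStarts (rest.zip (pvDepths (rest.map Prod.snd) 1)) from by
            unfold pvStarts; rw [List.filterMap_cons]; simp]
        rw [show pvEnds (((i, '('), (1:Int)) :: rest.zip (pvDepths (rest.map Prod.snd) 1))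
              = pvEnds (rest.zip (pvDepths (rest.map Prod.snd) 1)) from by
            unfold pvEnds; rw [List.filterMap_cons]; simp]
        cases pvEnds (rest.zip (pvDepths (rest.map Prod.snd) 1)) with
        | nil => simp
        | cons e E' => simp
      · rw [show pvBLoop l ((i, '(') :: rest) d start conteudo
              = pvBLoop l rest (d + 1) start conteudo from by simp [pvBLoop, hd0]]
        rw [ih (d + 1) start conteudo (by omega) hnn']
        congr 1
        unfold pvGroups
        rw [if_neg hd0, if_neg (by omega), hdep, List.zip_cons_cons]
        rw [show pvStarts (((i, '('), d + 1) :: rest.zip (pvDepths (rest.map Prod.snd) (d + 1)))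
              = pvStarts (rest.zip (pvDepths (rest.map Prod.snd) (d + 1))) from by
            unfold pvStarts; rw [List.filterMap_cons]
            rw [if_neg (by simp; omega)]]
        rw [show pvEnds (((i, '('), d + 1) :: rest.zip (pvDepths (rest.map Prod.snd) (d + 1)))
              = pvEnds (rest.zip (pvDepths (rest.map Prod.snd) (d + 1))) from by
            unfold pvEnds; rw [List.filterMap_cons]; simp]
    · by_cases hcr : c = ')'
      · subst hcr
        have hdv : (d + (if ')' = '(' then (1 : Int) else 0) - (if ')' = ')' then (1 : Int) else 0)) = d - 1 := by
          simp
        rw [hdv] at hdep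
        have hd1 : 0 ≤ d - 1 := hnn (d - 1) (by rw [hdep]; exact List.mem_cons_self)
        have hnn' : ∀ x ∈ pvDepths (rest.map Prod.snd) (d - 1), 0 ≤ x := by
          intro x hx
          exact hnn x (by rw [hdep]; exact List.mem_cons_of_mem _ hx)
        have hdne : d ≠ 0 := by omega
        by_cases hd10 : d - 1 = 0
        · rw [show pvBLoop l ((i, ')') :: rest) d start conteudo
                = pvBLoop l rest (d - 1) start
                    (conteudo ++ [PySem.List.slice l (some (start + 1)) (some i)]) from by
              simp [pvBLoop, hdne, hd10]]
          rw [ih (d - 1) start _ (by omega) hnn']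
          rw [List.append_assoc]
          congr 2
          unfold pvGroups
          rw [if_pos hd10, if_neg hdne, hdep, List.zip_cons_cons]
          rw [show pvStarts (((i, ')'), d - 1) :: rest.zip (pvDepths (rest.map Prod.snd) (d - 1)))
                = pvStarts (rest.zip (pvDepths (rest.map Prod.snd) (d - 1))) from by
              unfold pvStarts; rw [List.filterMap_cons]; simp]
          rw [show pvEnds (((i, ')'), d - 1) :: rest.zip (pvDepths (rest.map Prod.snd) (d - 1)))
                = i :: pvEnds (rest.zip (pvDepths (rest.map Prod.snd) (d - 1))) from by
              unfold pvEnds; rw [List.filterMap_cons, if_pos ⟨rfl, hd10⟩]]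
          rw [hd10]
          simp
        · rw [show pvBLoop l ((i, ')') :: rest) d start conteudo
                = pvBLoop l rest (d - 1) start conteudo from by
              simp [pvBLoop, hdne, hd10]]
          rw [ih (d - 1) start conteudo (by omega) hnn']
          congr 1
          unfold pvGroups
          rw [if_neg hdne, if_neg hd10, hdep, List.zip_cons_cons]
          rw [show pvStarts (((i, ')'), d - 1) :: rest.zip (pvDepths (rest.map Prod.snd) (d - 1)))
                = pvStarts (rest.zip (pvDepths (rest.map Prod.snd) (d - 1))) from by
              unfold pvStarts; rw [List.filterMap_cons]; simp]
          rw [show pvEnds (((i, ')'), d - 1) :: rest.zip (pvDepths (rest.map Prod.snd) (d - 1)))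
                = pvEnds (rest.zip (pvDepths (rest.map Prod.snd) (d - 1))) from by
              unfold pvEnds; rw [List.filterMap_cons]
              rw [if_neg (by simp; omega)]]
      · have hdv : (d + (if c = '(' then (1 : Int) else 0) - (if c = ')' then (1 : Int) else 0)) = d := by
          rw [if_neg hc, if_neg hcr]; ring
        rw [hdv] at hdep
        have hnn' : ∀ x ∈ pvDepths (rest.map Prod.snd) d, 0 ≤ x := by
          intro x hx
          exact hnn x (by rw [hdep]; exact List.mem_cons_of_mem _ hx)
        rw [show pvBLoop l ((i, c) :: rest) d start conteudo
              = pvBLoop l rest d start conteudo from by simp [pvBLoop, hc, hcr]]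
        rw [ih d start conteudo hd hnn']
        congr 1
        unfold pvGroups
        rw [hdep, List.zip_cons_cons]
        rw [show pvStarts (((i, c), d) :: rest.zip (pvDepths (rest.map Prod.snd) d))
              = pvStarts (rest.zip (pvDepths (rest.map Prod.snd) d)) from by
            unfold pvStarts; rw [List.filterMap_cons]
            rw [if_neg (by simp [hc])]]
        rw [show pvEnds (((i, c), d) :: rest.zip (pvDepths (rest.map Prod.snd) d))
              = pvEnds (rest.zip (pvDepths (rest.map Prod.snd) d)) from by
            unfold pvEnds; rw [List.filterMap_cons]
            rw [if_neg (by simp [hcr])]]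

lemma pvDepths_eq (l : List Char) : ∀ d : Int, pvDepths l d =
    (List.range l.length).map
      (fun k => d + ((l.take (k+1)).count '(' : Int) - ((l.take (k+1)).count ')' : Int)) := by
  induction l with
  | nil => intro d; simp [pvDepths]
  | cons c t ih =>
    intro d
    simp only [pvDepths, List.length_cons, List.range_succ_eq_map, List.map_cons, List.map_map]
    congr 1
    · simp only [List.take_succ_cons, List.take_zero, List.count_cons, List.count_nil]
      split_ifs <;> simp_all
    · rw [ih]
      apply List.map_congr_left
      intro k _
      simp only [Function.comp_apply, Nat.succ_eq_add_one, List.take_succ_cons, List.count_cons]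
      split_ifs <;> simp_all <;> omega

lemma length_pvDepths (l : List Char) : ∀ d : Int, (pvDepths l d).length = l.length := by
  induction l with
  | nil => intro d; rfl
  | cons c t ih => intro d; simp [pvDepths, ih]

-- ===== VERDICT (by name: the statement is the Claim_ definition above) =====
theorem Conditions_C_spec : Claim_equal_Conditions_C := by
  intro s _ hpre
  unfold Spec_Conditions_C Conditions_C Conditions_C_alt
  by_cases hg : (PySem.Chars.isIn ['('] s.toList && PySem.Chars.isIn [')'] s.toList) = true
  · have hop : '(' ∈ s.toList := by
      have := (PySem.Chars.isIn_iff_infix (sub := ['(']) (s := s.toList)).1 (by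
        simpa using (Bool.and_eq_true_iff.mp hg).1)
      exact List.singleton_sublist.mp this.sublist
    have hcl : ')' ∈ s.toList := by
      have := (PySem.Chars.isIn_iff_infix (sub := [')']) (s := s.toList)).1 (by
        simpa using (Bool.and_eq_true_iff.mp hg).2)
      exact List.singleton_sublist.mp this.sublist
    have hnn : ∀ x ∈ pvDepths s.toList 0, 0 ≤ x := by
      intro x hx
      rw [pvDepths_eq] at hx
      obtain ⟨k, hk, hxe⟩ := List.mem_map.mp hx
      have hkl : k < s.toList.length := List.mem_range.mp hk
      have := hpre ⟨hop, hcl⟩ (k + 1) (List.mem_range.mpr (by omega))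
      omega
    have hneq : s.toList ≠ [] := by
      intro h; rw [h] at hop; exact absurd hop (List.not_mem_nil)
    have hdeq : pvDepths ((PySem.List.enumerate s.toList).map Prod.snd) 0
        = pvDepths s.toList 0 := by
      simp [PySem.List.map_snd_enumerate]
    have hA : pvALoop s.toList (PySem.List.enumerate s.toList) [] []
        = some ([] ++ pvGroups s.toList (PySem.List.enumerate s.toList) 0 0) := by
      have h1 := pvLoop_eq s.toList (PySem.List.enumerate s.toList) [] 0 []
        (by intro h; exact absurd rfl h)
      simp only [List.length_nil, Nat.cast_zero] at h1
      rw [h1]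
      exact pvBLoop_staged s.toList (PySem.List.enumerate s.toList) 0 0 [] le_rfl
        (by rw [hdeq]; exact hnn)
    cases hm : PySem.List.min? (pvDepths s.toList 0) (fun x => x) with
    | none =>
      exfalso
      have := (PySem.List.min?_eq_none_iff (pvDepths s.toList 0) (fun x => x)).mp hm
      have hl := length_pvDepths s.toList 0
      rw [this] at hl
      exact hneq (List.eq_nil_of_length_eq_zero hl.symm)
    | some m =>
      have hm0 : 0 ≤ m := hnn m (PySem.List.min?_mem hm)
      unfold pvGroups at hA
      rw [if_pos rfl, hdeq] at hA
      simp only [hg, hA, hm, if_neg (show ¬ m < 0 by omega)]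
      simp
  · rw [Bool.not_eq_true] at hg
    simp only [hg]
    simp
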